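-- pv_equiv track=rewrite | github.com/cygane/Uwr | Wstęp do programowania w Pythonie/lista11/11.2.py | slownik
-- ===== SOURCE A (Python) =====
-- from collections import defaultdict as dd
--
-- def slownik(slowo):
--     s = dd(lambda: 0)
--     ktory = 1
--     for i in slowo:
--         if i not in s:
--             s[i] = str(ktory)
--             ktory += 1
--     return s
-- ===== SOURCE B (Python) =====
-- from collections import defaultdict as dd
--
-- def slownik(slowo):
--     s = dd(lambda: 0)
--     for i, c in enumerate(slowo):
--         if slowo.index(c) == i:
--             s[c] = str(len(set(slowo[:i + 1])))
--     return s
-- ===== Notes on version B (the rewrite author's own statement) =====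
-- stated objective: alternative
-- what changed: A maintains running state (dict-membership guard plus a counter); B keeps no counter at all: it detects a first occurrence by comparing the position with slowo.index(c) and computes each rank independently as the number of distinct characters in the prefix ending there (len(set(slowo[:i+1]))).
import Mathlib
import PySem

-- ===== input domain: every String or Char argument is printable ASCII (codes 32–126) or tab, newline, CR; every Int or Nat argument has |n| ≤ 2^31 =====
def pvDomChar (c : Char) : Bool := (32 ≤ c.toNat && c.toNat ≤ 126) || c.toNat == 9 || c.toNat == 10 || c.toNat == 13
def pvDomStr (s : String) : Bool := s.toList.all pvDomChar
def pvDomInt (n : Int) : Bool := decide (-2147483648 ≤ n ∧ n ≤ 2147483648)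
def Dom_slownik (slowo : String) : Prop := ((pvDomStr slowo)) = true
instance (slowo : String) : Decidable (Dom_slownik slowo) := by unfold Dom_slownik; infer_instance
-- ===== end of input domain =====

-- B replaces A's stateful pass (dict-membership guard + running counter) by a per-position
-- closed-form computation: rank = distinct count of the prefix at the first occurrence
-- (alternative decomposition, no accumulator state besides the dict); return value only.

-- ===== PORT A =====
def slownik (slowo : String) : List (String × String) :=
  (slowo.toList.foldl
    (fun (st : PySem.Dict String String × Int) i =>
      if !(st.1.contains (String.ofList [i])) then
        (st.1.insert (String.ofList [i]) (PySem.Int.toStr st.2), st.2 + 1)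
      else st)
    (PySem.Dict.empty, 1)).1.items

-- ===== PORT B =====
-- slowo.index(c) for the single character c is the first index of c: PySem.List.index? is exact here.
def slownik_alt (slowo : String) : List (String × String) :=
  let l := slowo.toList
  ((PySem.List.enumerate l 0).foldl
    (fun (s : PySem.Dict String String) p =>
      if (PySem.List.index? l p.2).map Int.ofNat = some p.1 then
        s.insert (String.ofList [p.2])
          (PySem.Int.toStr (PySem.Set.len (PySem.Set.ofList (PySem.List.slice l none (some (p.1 + 1))))))
      else s)
    PySem.Dict.empty).items

-- ===== PRECONDITION & SPEC =====
def Spec_slownik (slowo : String) (out : List (String × String)) : Prop := out = slownik_alt slowo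
instance (slowo : String) (out : List (String × String)) : Decidable (Spec_slownik slowo out) := by unfold Spec_slownik; infer_instance

-- ===== CLAIM (what is proved, stated in full; the proofs are below) =====
def Claim_equal_slownik : Prop := ∀ (slowo : String), Dom_slownik slowo → Spec_slownik slowo (slownik slowo)

-- ===== LEMMAS AND PROOFS =====

-- A's loop body, named so the proofs can talk about it (definitionally the lambda in `slownik`)
def stepA (st : PySem.Dict String String × Int) (i : Char) : PySem.Dict String String × Int :=
  if !(st.1.contains (String.ofList [i])) then
    (st.1.insert (String.ofList [i]) (PySem.Int.toStr st.2), st.2 + 1)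
  else st

-- B's loop body over the full list l (definitionally the lambda in `slownik_alt`)
def stepB (l : List Char) (s : PySem.Dict String String) (p : Int × Char) : PySem.Dict String String :=
  if (PySem.List.index? l p.2).map Int.ofNat = some p.1 then
    s.insert (String.ofList [p.2])
      (PySem.Int.toStr (PySem.Set.len (PySem.Set.ofList (PySem.List.slice l none (some (p.1 + 1))))))
  else s

-- the elements of l not yet in u, first occurrences in order
def gNew : List Char → List Char → List Char
  | [], _ => []
  | c :: l, u => if c ∈ u then gNew l u else c :: gNew l (u ++ [c])

theorem mk1_inj : Function.Injective (fun c : Char => String.ofList [c]) := by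
  intro a b h
  have := congrArg String.toList h
  simpa using this

theorem foldA_items (l u : List Char) (d : PySem.Dict String String) (n : Int)
    (hnd : d.keys.Nodup)
    (hc : ∀ c, d.contains (String.ofList [c]) = decide (c ∈ u)) :
    (l.foldl stepA (d, n)).1.items
      = d.items ++ (PySem.List.enumerate (gNew l u) n).map
          (fun p => (String.ofList [p.2], PySem.Int.toStr p.1)) := by
  induction l generalizing u d n with
  | nil => simp [gNew]
  | cons c l ih =>
    by_cases hm : c ∈ u
    · have hct : d.contains (String.ofList [c]) = true := by rw [hc]; simp [hm]
      have hs : stepA (d, n) c = (d, n) := by simp [stepA, hct]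
      rw [List.foldl_cons, hs, ih u d n hnd hc]
      simp [gNew, hm]
    · have hcf : d.contains (String.ofList [c]) = false := by rw [hc]; simp [hm]
      have hs : stepA (d, n) c
          = (d.insert (String.ofList [c]) (PySem.Int.toStr n), n + 1) := by
        simp [stepA, hcf]
      have hitems : (d.insert (String.ofList [c]) (PySem.Int.toStr n)).items
          = d.items ++ [(String.ofList [c], PySem.Int.toStr n)] := by
        simp [PySem.Dict.items_insert, hcf]
      have hstep := ih (u ++ [c]) (d.insert (String.ofList [c]) (PySem.Int.toStr n)) (n + 1)
        (PySem.Dict.nodup_keys_insert _ _ _ hnd)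
        (by
          intro c'
          rw [PySem.Dict.contains_insert, hc]
          by_cases h' : c' = c <;> simp [h', mk1_inj.eq_iff])
      rw [List.foldl_cons, hs, hstep, hitems]
      simp [gNew, hm, PySem.List.enumerate_cons]

-- first index across a fresh prefix
theorem index?_append_fresh {m : List Char} (t : List Char) {c : Char} (h : c ∉ m) :
    PySem.List.index? (m ++ t) c = (PySem.List.index? t c).map (· + m.length) := by
  induction m with
  | nil => cases h : PySem.List.index? t c <;> (simp only [List.nil_append, h]; simp_all)
  | cons a m ih =>
    have ha : a ≠ c := by intro e; exact h (e ▸ List.mem_cons_self)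
    have hm : c ∉ m := fun e => h (List.mem_cons_of_mem _ e)
    rw [List.cons_append, PySem.List.index?_cons_of_ne _ ha, ih hm]
    cases PySem.List.index? t c <;> simp <;> omega

-- the ordered set of a prefix extended by one element
theorem ofList_append_singleton (m : List Char) (c : Char) :
    PySem.Set.ofList (m ++ [c])
      = if c ∈ m then PySem.Set.ofList m else PySem.Set.ofList m ++ [c] := by
  rw [PySem.Set.ofList_eq_foldl, List.foldl_append, ← PySem.Set.ofList_eq_foldl]
  by_cases hm : c ∈ m <;>
    simp [PySem.Set.add, PySem.Set.mem_ofList, hm]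

theorem foldB_items (r : List Char) : ∀ (m : List Char) (d : PySem.Dict String String),
    d.keys.Nodup →
    (∀ x : Char, d.contains (String.ofList [x]) = decide (x ∈ m)) →
    ((PySem.List.enumerate r (m.length : Int)).foldl (stepB (m ++ r)) d).items
      = d.items ++ (PySem.List.enumerate (gNew r (PySem.Set.ofList m))
            (((PySem.Set.ofList m).length : Int) + 1)).map
          (fun p => (String.ofList [p.2], PySem.Int.toStr p.1)) := by
  induction r with
  | nil => intro m d _ _; simp [gNew]
  | cons c r ih =>
    intro m d hnd hc
    have hassoc : m ++ c :: r = (m ++ [c]) ++ r := by simp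
    have hlen1 : ((m ++ [c]).length : Int) = (m.length : Int) + 1 := by simp
    by_cases hm : c ∈ m
    · -- not the first occurrence: guard is false, nothing inserted
      obtain ⟨k, hk⟩ := Option.isSome_iff_exists.mp
        ((PySem.List.index?_isSome_iff m c).mpr hm)
      obtain ⟨pre, suf, hsplit, hklen, -⟩ := (PySem.List.index?_eq_some_iff m c k).mp hk
      have hklt : k < m.length := by subst hsplit; simp [← hklen]
      have hguard : (PySem.List.index? (m ++ c :: r) c).map Int.ofNat
          ≠ some ((m.length : Int)) := by
        rw [PySem.List.index?_append_of_mem _ hm, hk]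
        simp only [Option.map_some, ne_eq, Option.some.injEq]
        intro h
        simp only [Int.ofNat_eq_natCast] at h
        omega
      have hs : stepB (m ++ c :: r) d ((m.length : Int), c) = d := by
        simp only [stepB]
        rw [if_neg hguard]
      have hmemeq : ∀ x : Char, (x ∈ m ++ [c]) ↔ x ∈ m := by
        intro x; constructor
        · intro h; rcases List.mem_append.mp h with h | h
          · exact h
          · simpa [List.mem_singleton.mp h] using hm
        · intro h; exact List.mem_append.mpr (Or.inl h)
      have hof : PySem.Set.ofList (m ++ [c]) = PySem.Set.ofList m := by
        rw [ofList_append_singleton]; simp [hm]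
      rw [PySem.List.enumerate_cons, List.foldl_cons, hs, hassoc, ← hlen1,
        ih (m ++ [c]) d hnd (by intro x; rw [hc]; simp [hmemeq x]), hof]
      simp [gNew, PySem.Set.mem_ofList, hm]
    · -- first occurrence: guard is true, a fresh key is appended
      have hmo : c ∉ PySem.Set.ofList m := fun h => hm ((PySem.Set.mem_ofList _ _).mp h)
      have hguard : (PySem.List.index? (m ++ c :: r) c).map Int.ofNat
          = some ((m.length : Int)) := by
        rw [index?_append_fresh _ hm, PySem.List.index?_cons_self]
        simp
      have hslice : PySem.List.slice (m ++ c :: r) none (some ((m.length : Int) + 1))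
          = m ++ [c] := by
        have : ((m.length : Int) + 1) = ((m.length + 1 : Nat) : Int) := by push_cast; ring
        rw [this, PySem.List.slice_to_natCast, hassoc,
          List.take_left' (by simp)]
      have hval : PySem.Set.len (PySem.Set.ofList (m ++ [c]))
          = ((PySem.Set.ofList m).length : Int) + 1 := by
        rw [ofList_append_singleton]
        simp [hm, PySem.Set.len]
      have hcf : d.contains (String.ofList [c]) = false := by rw [hc]; simp [hm]
      have hs : stepB (m ++ c :: r) d ((m.length : Int), c)
          = d.insert (String.ofList [c])
              (PySem.Int.toStr (((PySem.Set.ofList m).length : Int) + 1)) := by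
        simp only [stepB, hguard, hslice, hval]
        simp
      have hitems : (d.insert (String.ofList [c])
            (PySem.Int.toStr (((PySem.Set.ofList m).length : Int) + 1))).items
          = d.items ++ [(String.ofList [c],
              PySem.Int.toStr (((PySem.Set.ofList m).length : Int) + 1))] := by
        simp [PySem.Dict.items_insert, hcf]
      have hof : PySem.Set.ofList (m ++ [c]) = PySem.Set.ofList m ++ [c] := by
        rw [ofList_append_singleton]; simp [hm]
      rw [PySem.List.enumerate_cons, List.foldl_cons, hs, hassoc, ← hlen1,
        ih (m ++ [c])
          (d.insert (String.ofList [c]) (PySem.Int.toStr (((PySem.Set.ofList m).length : Int) + 1)))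
          (PySem.Dict.nodup_keys_insert _ _ _ hnd)
          (by
            intro x
            rw [PySem.Dict.contains_insert, hc]
            by_cases h' : x = c <;> simp [h', mk1_inj.eq_iff, hm]),
        hitems, hof]
      simp [gNew, PySem.Set.mem_ofList, hm, PySem.List.enumerate_cons]

-- ===== VERDICT (by name: the statement is the Claim_ definition above) =====
theorem slownik_spec : Claim_equal_slownik := by
  intro slowo _
  show (slowo.toList.foldl stepA (PySem.Dict.empty, 1)).1.items = slownik_alt slowo
  rw [foldA_items slowo.toList [] PySem.Dict.empty 1
      PySem.Dict.nodup_keys_empty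
      (by intro c; simp [PySem.Dict.contains_empty])]
  show _ = ((PySem.List.enumerate slowo.toList ((List.length ([] : List Char) : Int))).foldl
      (stepB ([] ++ slowo.toList)) PySem.Dict.empty).items
  rw [foldB_items slowo.toList [] PySem.Dict.empty
      PySem.Dict.nodup_keys_empty
      (by intro c; simp [PySem.Dict.contains_empty])]
  simp [PySem.Dict.empty, PySem.Set.ofList]
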